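-- pv_equiv track=rewrite | github.com/bmlsj/algorithm | 프로그래머스/lv1/82612. 부족한 금액 계산하기/부족한 금액 계산하기.py | solution
-- ===== SOURCE A (Python) =====
-- def solution(price, money, count):
--     answer = 0
--     cnt = 0
--
--     for i in range(count+1):
--         cnt += i
--
--     answer = cnt*price
--     if answer < money:
--         return 0
--     else:
--         answer -= money
--         return answer
-- ===== SOURCE B (Python) =====
-- def solution(price, money, count):
--     c = max(count, 0)
--     shortfall = price * c * (c + 1) // 2 - money
--     return max(shortfall, 0)
-- ===== Notes on version B (the rewrite author's own statement) =====
-- stated objective: faster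
-- what changed: Replaces the O(count) accumulation loop over range(count+1) with the closed-form triangular number c*(c+1)//2 and a max for clamping.
import Mathlib
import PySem

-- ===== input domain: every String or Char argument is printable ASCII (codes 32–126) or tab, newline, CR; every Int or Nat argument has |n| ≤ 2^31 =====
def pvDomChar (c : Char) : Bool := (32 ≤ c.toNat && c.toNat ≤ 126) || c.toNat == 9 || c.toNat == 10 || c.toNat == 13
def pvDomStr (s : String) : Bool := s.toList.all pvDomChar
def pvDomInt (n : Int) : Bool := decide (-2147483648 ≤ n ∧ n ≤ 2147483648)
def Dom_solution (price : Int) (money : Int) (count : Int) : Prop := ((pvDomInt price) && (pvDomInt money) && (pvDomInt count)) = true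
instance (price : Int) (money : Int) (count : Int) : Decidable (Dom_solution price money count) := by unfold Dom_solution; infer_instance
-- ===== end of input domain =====

-- B replaces A's O(count) summation loop by the closed-form triangular number (faster, asymptotic).

-- ===== PORT A =====
def solution (price : Int) (money : Int) (count : Int) : Int :=
  let cnt := (PySem.List.pyRange 0 (count + 1) 1).foldl (fun acc i => acc + i) 0
  let answer := cnt * price
  if answer < money then 0 else answer - money

-- ===== PORT B =====
def solution_alt (price : Int) (money : Int) (count : Int) : Int :=
  let c := max count 0
  let shortfall := PySem.Int.floordiv (price * c * (c + 1)) 2 - money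
  max shortfall 0

-- ===== PRECONDITION & SPEC =====
def Spec_solution (price : Int) (money : Int) (count : Int) (out : Int) : Prop := out = solution_alt price money count
instance (price : Int) (money : Int) (count : Int) (out : Int) : Decidable (Spec_solution price money count out) := by unfold Spec_solution; infer_instance

-- ===== CLAIM (what is proved, stated in full; the proofs are below) =====
def Claim_equal_solution : Prop := ∀ (price : Int) (money : Int) (count : Int), Dom_solution price money count → Spec_solution price money count (solution price money count)

-- ===== LEMMAS AND PROOFS =====

-- twice the sum 0+1+…+(m-1) equals m*(m-1)
theorem two_mul_range_sum (m : Nat) :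
    2 * ((List.range m).map (fun (k : Nat) => (k : Int))).sum = (m : Int) * ((m : Int) - 1) := by
  induction m with
  | zero => simp
  | succ n ih =>
    rw [List.range_succ, List.map_append, List.sum_append]
    simp only [List.map_cons, List.map_nil, List.sum_cons, List.sum_nil]
    push_cast
    rw [mul_add, ih]
    ring

-- the loop in A computes the triangular number of count (0 for negative count)
theorem cnt_eq (count : Int) :
    (PySem.List.pyRange 0 (count + 1) 1).foldl (fun acc i => acc + i) 0
      = PySem.Int.floordiv ((max count 0) * ((max count 0) + 1)) 2 := by
  have hfold := PySem.List.foldl_add (l := PySem.List.pyRange 0 (count + 1) 1)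
    (g := fun x => x) (a := (0 : Int))
  simp only [List.map_id_fun', id] at hfold
  have : (fun acc i => acc + i) = (fun (acc : Int) i => acc + (fun x => x) i) := rfl
  rw [this, hfold, PySem.List.pyRange_one]
  simp only [zero_add, sub_zero]
  set m := (count + 1).toNat with hm
  have h2 : 2 * ((List.range m).map (fun (k : Nat) => (k : Int))).sum = (m : Int) * ((m : Int) - 1) :=
    two_mul_range_sum m
  have hfd : PySem.Int.floordiv ((max count 0) * ((max count 0) + 1)) 2
      = ((max count 0) * ((max count 0) + 1)) / 2 :=
    PySem.Int.floordiv_eq_ediv_of_pos (by norm_num)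
  rw [hfd]
  by_cases hneg : count ≤ -1
  · have hm0 : m = 0 := by omega
    have hc : max count 0 = 0 := by omega
    simp [hm0, hc]
  · have hpos : -1 < count := by omega
    have hc : max count 0 = count := by omega
    have hmc : (m : Int) = count + 1 := by omega
    have : (max count 0) * ((max count 0) + 1)
        = 2 * ((List.range m).map (fun (k : Nat) => (k : Int))).sum := by
      rw [h2, hc, hmc]; ring
    rw [this, Int.mul_ediv_cancel_left _ (by norm_num)]

-- ===== VERDICT (by name: the statement is the Claim_ definition above) =====
theorem solution_spec : Claim_equal_solution := by
  intro price money count _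
  unfold Spec_solution solution solution_alt
  simp only [cnt_eq count]
  set c := max count 0 with hc
  have hfd : PySem.Int.floordiv (c * (c + 1)) 2 = (c * (c + 1)) / 2 :=
    PySem.Int.floordiv_eq_ediv_of_pos (by norm_num)
  have hfd' : PySem.Int.floordiv (price * c * (c + 1)) 2 = (price * c * (c + 1)) / 2 :=
    PySem.Int.floordiv_eq_ediv_of_pos (by norm_num)
  have hdvd : (2 : Int) ∣ c * (c + 1) := (Int.even_mul_succ_self c).two_dvd
  obtain ⟨t, ht⟩ := hdvd
  have h1 : c * (c + 1) / 2 = t := by rw [ht, Int.mul_ediv_cancel_left _ (by norm_num)]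
  have h2 : price * c * (c + 1) / 2 = t * price := by
    have : price * c * (c + 1) = 2 * (t * price) := by rw [mul_assoc, ht]; ring
    rw [this, Int.mul_ediv_cancel_left _ (by norm_num)]
  rw [hfd, hfd', h1, h2]
  omega
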